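-- pv_equiv track=rewrite | github.com/leaky/aoc25 | day2/part1.py | generate_invalid_ids
-- ===== SOURCE A (Python) =====
-- def generate_invalid_ids(limit: int) -> list[int]:
--     """
--         only numbers with an even digit count can be a repeated pattern
--         (like: 2 digits, 4 digits, 6 digits, etc)
--
--         for each even number of digits, the func determines how many digits are in the “half”
--         eg: 4 digit numbers use a 2 digit repeating unit
--
--         then:
--             it loops over all possible first halves
--             builds the full number by repeating that half twice
--             stops early if the number exceeds the limit
--             collects all valid numbers into a list and returns it
--     """
--     invalid: list[int] = []
--
--     for length in range(2, len(str(limit)) + 1, 2):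
--         half = length // 2
--         start = 10 ** (half - 1) # no leading zeros
--         end = 10 ** half
--
--         for root in range(start, end):
--             num = int(str(root) * 2)
--             if num > limit:
--                 break
--             invalid.append(num)
--
--     return invalid
-- ===== SOURCE B (Python) =====
-- def generate_invalid_ids(limit: int) -> list[int]:
--     """Single loop over the repeating half: int(str(root)*2) is strictly
--     increasing in root, so one ascending scan with one stopping point
--     reproduces the per-digit-length blocks of the original."""
--     invalid: list[int] = []
--     root = 1
--     while True:
--         num = int(str(root) * 2)
--         if num > limit:
--             return invalid
--         invalid.append(num)
--         root += 1
-- ===== Notes on version B (the rewrite author's own statement) =====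
-- stated objective: simpler
-- what changed: Replaced the nested loops (outer over even digit-lengths with power-of-ten block bounds, inner over half-values with a per-block break) by one flat ascending loop over the repeating half that stops at the first int(str(root)*2) exceeding the limit, relying on the strict monotonicity of int(str(root)*2).
import Mathlib
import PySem

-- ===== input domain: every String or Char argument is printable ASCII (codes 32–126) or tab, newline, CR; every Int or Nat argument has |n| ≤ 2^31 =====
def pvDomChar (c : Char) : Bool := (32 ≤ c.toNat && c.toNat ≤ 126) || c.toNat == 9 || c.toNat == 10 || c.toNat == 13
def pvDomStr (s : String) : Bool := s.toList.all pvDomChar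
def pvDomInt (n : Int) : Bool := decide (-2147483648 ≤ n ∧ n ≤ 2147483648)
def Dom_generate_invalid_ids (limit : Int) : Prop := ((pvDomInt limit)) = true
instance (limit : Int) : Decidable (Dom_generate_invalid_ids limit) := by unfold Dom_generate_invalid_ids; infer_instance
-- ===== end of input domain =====

-- B collapses A's nested digit-length loops into one flat loop over the repeating half
-- (simpler decomposition, same output); return values proved equal for every int limit.

-- int(s) for the NONEMPTY PURE-DIGIT strings produced by str(root) with root ≥ 1 (the only
-- strings int() is applied to here): hand port (fold acc*10+digit) so the proofs can unfold
-- it; exact on that domain.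
def pvStrToIntAux (a : Int) (cs : List Char) : Int :=
  cs.foldl (fun acc c => acc * 10 + ((c.toNat - 48 : Nat) : Int)) a

def pvStrToInt (cs : List Char) : Int := pvStrToIntAux 0 cs

-- num = int(str(root) * 2)
def pvNumTwice (root : Int) : Int :=
  pvStrToInt (PySem.Int.toChars root ++ PySem.Int.toChars root)

-- ----- support lemmas the B port needs for termination (cited in decreasing_by) -----

lemma pvStrToIntAux_nonneg (cs : List Char) : ∀ a : Int, 0 ≤ a → 0 ≤ pvStrToIntAux a cs := by
  induction cs with
  | nil => intro a ha; simpa [pvStrToIntAux] using ha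
  | cons c tl ih =>
      intro a ha
      simp only [pvStrToIntAux, List.foldl] at *
      exact ih _ (by positivity)

lemma pvStrToIntAux_eq (cs : List Char) : ∀ a : Int,
    pvStrToIntAux a cs = a * 10 ^ cs.length + pvStrToIntAux 0 cs := by
  induction cs with
  | nil => intro a; simp [pvStrToIntAux]
  | cons c tl ih =>
      intro a
      simp only [pvStrToIntAux, List.foldl, List.length_cons] at *
      rw [ih (a * 10 + ((c.toNat - 48 : Nat) : Int)), ih (0 * 10 + ((c.toNat - 48 : Nat) : Int))]
      ring

lemma pvStrToInt_append (xs ys : List Char) :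
    pvStrToInt (xs ++ ys) = pvStrToInt xs * 10 ^ ys.length + pvStrToInt ys := by
  simp only [pvStrToInt, pvStrToIntAux, List.foldl_append]
  exact pvStrToIntAux_eq ys _

lemma pvToDigitsCore_acc : ∀ (f n : Nat) (ds : List Char),
    Nat.toDigitsCore 10 f n ds = Nat.toDigitsCore 10 f n [] ++ ds := by
  intro f
  induction f with
  | zero => intro n ds; simp [Nat.toDigitsCore]
  | succ f ih =>
      intro n ds
      simp only [Nat.toDigitsCore]
      by_cases h : n / 10 = 0
      · simp [h]
      · simp only [h, if_false]
        rw [ih (n / 10) [Nat.digitChar (n % 10)], ih (n / 10) (Nat.digitChar (n % 10) :: ds)]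
        simp

lemma pvToDigitsCore_fuel : ∀ (n : Nat), ∀ f : Nat, n < f →
    Nat.toDigitsCore 10 f n [] = Nat.toDigits 10 n := by
  intro n
  induction n using Nat.strong_induction_on with
  | _ n ih =>
      intro f hf
      match f, hf with
      | f + 1, _ =>
        show Nat.toDigitsCore 10 (f + 1) n [] = Nat.toDigitsCore 10 (n + 1) n []
        simp only [Nat.toDigitsCore]
        by_cases h : n / 10 = 0
        · simp [h]
        · simp only [h, if_false]
          have hn10 : n / 10 < n := Nat.div_lt_self (by omega) (by omega)
          rw [pvToDigitsCore_acc f (n / 10), pvToDigitsCore_acc n (n / 10)]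
          rw [ih (n / 10) hn10 f (by omega), ih (n / 10) hn10 n (by omega)]

lemma pvToDigits_lt (n : Nat) (h : n < 10) : Nat.toDigits 10 n = [Nat.digitChar n] := by
  have h0 : n / 10 = 0 := Nat.div_eq_of_lt h
  simp [Nat.toDigits, Nat.toDigitsCore, h0, Nat.mod_eq_of_lt h]

lemma pvToDigits_ge (n : Nat) (h : 10 ≤ n) :
    Nat.toDigits 10 n = Nat.toDigits 10 (n / 10) ++ [Nat.digitChar (n % 10)] := by
  have h0 : ¬ n / 10 = 0 := by
    intro hc
    have := Nat.lt_of_div_eq_zero (by omega) hc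
    omega
  show Nat.toDigitsCore 10 (n + 1) n [] = _
  simp only [Nat.toDigitsCore, h0, if_false]
  rw [pvToDigitsCore_acc n (n / 10)]
  rw [pvToDigitsCore_fuel (n / 10) n (Nat.lt_of_lt_of_le (Nat.div_lt_self (by omega) (by omega)) (le_refl n))]

lemma pvDigitChar_val (m : Nat) (h : m < 10) : ((Nat.digitChar m).toNat - 48 : Nat) = m := by
  interval_cases m <;> decide

lemma pvStrToInt_toDigits : ∀ n : Nat, pvStrToInt (Nat.toDigits 10 n) = (n : Int) := by
  intro n
  induction n using Nat.strong_induction_on with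
  | _ n ih =>
      by_cases h : n < 10
      · rw [pvToDigits_lt n h]
        simp [pvStrToInt, pvStrToIntAux, pvDigitChar_val n h]
      · rw [pvToDigits_ge n (by omega)]
        rw [pvStrToInt_append]
        have hrec := ih (n / 10) (Nat.div_lt_self (by omega) (by omega))
        have hd : pvStrToInt [Nat.digitChar (n % 10)] = ((n % 10 : Nat) : Int) := by
          simp [pvStrToInt, pvStrToIntAux, pvDigitChar_val (n % 10) (Nat.mod_lt _ (by omega))]
        rw [hrec, hd]
        simp only [List.length_singleton, pow_one]
        push_cast
        omega

lemma pvNumTwice_closed (r : Int) (hr : 1 ≤ r) :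
    pvNumTwice r = r * 10 ^ (Nat.toDigits 10 r.toNat).length + r := by
  have hneg : ¬ r < 0 := by omega
  simp only [pvNumTwice, PySem.Int.toChars, hneg, if_false]
  rw [pvStrToInt_append, pvStrToInt_toDigits]
  have : ((r.toNat : Int)) = r := Int.toNat_of_nonneg (by omega)
  rw [this]

lemma pv_le_numTwice (r : Int) : r ≤ pvNumTwice r := by
  by_cases h : r ≤ 0
  case pos =>
    have : 0 ≤ pvNumTwice r := pvStrToIntAux_nonneg _ 0 le_rfl
    omega
  case neg =>
    have hc := pvNumTwice_closed r (by omega)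
    have hp : (0 : Int) ≤ r * 10 ^ (Nat.toDigits 10 r.toNat).length := by
      have h10 : (0:Int) ≤ 10 ^ (Nat.toDigits 10 r.toNat).length := by positivity
      exact mul_nonneg (by omega) h10
    omega

-- ===== PORT A =====
-- inner loop: for root in range(start, end): num = int(str(root)*2); if num > limit: break; invalid.append(num)
def pvInnerA (limit : Int) : List Int → List Int → List Int
  | [], invalid => invalid
  | root :: rest, invalid =>
      let num := pvNumTwice root
      if num > limit then invalid
      else pvInnerA limit rest (invalid ++ [num])

def generate_invalid_ids (limit : Int) : List Int :=
  (PySem.List.pyRange 2 (PySem.Str.len (PySem.Int.toStr limit) + 1) 2).foldl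
    (fun invalid length =>
      let half := PySem.Int.floordiv length 2
      -- 10 ** (half - 1) and 10 ** half: every `length` in the range is ≥ 2, so half ≥ 1
      -- and the Nat exponents are exact
      let start : Int := 10 ^ (half - 1).toNat
      let stop : Int := 10 ^ half.toNat
      pvInnerA limit (PySem.List.pyRange start stop 1) invalid)
    []

-- ===== PORT B =====
-- while True: num = int(str(root)*2); if num > limit: return invalid; invalid.append(num); root += 1
def pvLoopB (limit root : Int) (invalid : List Int) : List Int :=
  let num := pvNumTwice root
  if num > limit then invalid
  else pvLoopB limit (root + 1) (invalid ++ [num])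
termination_by (limit + 1 - root).toNat
decreasing_by
  have h1 := pv_le_numTwice root
  omega

def generate_invalid_ids_alt (limit : Int) : List Int := pvLoopB limit 1 []

-- ===== PRECONDITION & SPEC =====
def Spec_generate_invalid_ids (limit : Int) (out : List Int) : Prop := out = generate_invalid_ids_alt limit
instance (limit : Int) (out : List Int) : Decidable (Spec_generate_invalid_ids limit out) := by unfold Spec_generate_invalid_ids; infer_instance

-- ===== CLAIM (what is proved, stated in full; the proofs are below) =====
def Claim_equal_generate_invalid_ids : Prop := ∀ (limit : Int), Dom_generate_invalid_ids limit → Spec_generate_invalid_ids limit (generate_invalid_ids limit)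

-- ===== LEMMAS AND PROOFS =====

-- the common spine: numbers produced from roots s, s+1, … while < e and num ≤ limit
def pvChain (limit s e : Int) : List Int :=
  if h : s < e ∧ pvNumTwice s ≤ limit then pvNumTwice s :: pvChain limit (s + 1) e else []
termination_by (e - s).toNat
decreasing_by omega

lemma pvLen_pos (n : Nat) : 1 ≤ (Nat.toDigits 10 n).length := by
  by_cases h : n < 10
  · rw [pvToDigits_lt n h]; simp
  · rw [pvToDigits_ge n (by omega)]; simp

lemma pvLt_pow_len : ∀ n : Nat, n < 10 ^ (Nat.toDigits 10 n).length := by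
  intro n
  induction n using Nat.strong_induction_on with
  | _ n ih =>
      by_cases h : n < 10
      · rw [pvToDigits_lt n h]; simpa using h
      · rw [pvToDigits_ge n (by omega)]
        have hrec := ih (n / 10) (Nat.div_lt_self (by omega) (by omega))
        simp only [List.length_append, List.length_singleton]
        have : n = 10 * (n / 10) + n % 10 := (Nat.div_add_mod n 10).symm ▸ by omega
        calc n < 10 * (n / 10 + 1) := by omega
        _ ≤ 10 * 10 ^ (Nat.toDigits 10 (n / 10)).length := by
              have : n / 10 + 1 ≤ 10 ^ (Nat.toDigits 10 (n / 10)).length := hrec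
              exact Nat.mul_le_mul_left 10 this
        _ = 10 ^ ((Nat.toDigits 10 (n / 10)).length + 1) := by ring

lemma pvPow_len_le : ∀ n : Nat, 1 ≤ n → 10 ^ ((Nat.toDigits 10 n).length - 1) ≤ n := by
  intro n
  induction n using Nat.strong_induction_on with
  | _ n ih =>
      intro hn
      by_cases h : n < 10
      · rw [pvToDigits_lt n h]; simpa using hn
      · rw [pvToDigits_ge n (by omega)]
        have hrec := ih (n / 10) (Nat.div_lt_self (by omega) (by omega)) (by omega)
        simp only [List.length_append, List.length_singleton]
        have hl := pvLen_pos (n / 10)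
        have : (Nat.toDigits 10 (n / 10)).length + 1 - 1 = ((Nat.toDigits 10 (n / 10)).length - 1) + 1 := by omega
        rw [this, pow_succ]
        have h1 : 10 ^ ((Nat.toDigits 10 (n / 10)).length - 1) * 10 ≤ (n / 10) * 10 :=
          Nat.mul_le_mul_right 10 hrec
        omega

lemma pvLen_mono (m n : Nat) (hm : 1 ≤ m) (hmn : m ≤ n) :
    (Nat.toDigits 10 m).length ≤ (Nat.toDigits 10 n).length := by
  by_contra hc
  have hc2 : (Nat.toDigits 10 n).length < (Nat.toDigits 10 m).length := by omega
  have h1 : n < 10 ^ (Nat.toDigits 10 n).length := pvLt_pow_len n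
  have h2 : 10 ^ ((Nat.toDigits 10 m).length - 1) ≤ m := pvPow_len_le m hm
  have h3 : 10 ^ (Nat.toDigits 10 n).length ≤ 10 ^ ((Nat.toDigits 10 m).length - 1) :=
    Nat.pow_le_pow_right (by omega) (by omega)
  omega

lemma pvNumTwice_mono (r r' : Int) (hr : 1 ≤ r) (hrr : r ≤ r') :
    pvNumTwice r ≤ pvNumTwice r' := by
  rw [pvNumTwice_closed r hr, pvNumTwice_closed r' (by omega)]
  have hlen : (Nat.toDigits 10 r.toNat).length ≤ (Nat.toDigits 10 r'.toNat).length :=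
    pvLen_mono _ _ (by omega) (by omega)
  have hp : (10 : Int) ^ (Nat.toDigits 10 r.toNat).length ≤ 10 ^ (Nat.toDigits 10 r'.toNat).length :=
    pow_le_pow_right₀ (by norm_num) hlen
  have h1 : r * 10 ^ (Nat.toDigits 10 r.toNat).length ≤ r' * 10 ^ (Nat.toDigits 10 r'.toNat).length :=
    mul_le_mul hrr hp (by positivity) (by omega)
  omega

lemma pvLen_pow (H : Nat) : (Nat.toDigits 10 (10 ^ H)).length = H + 1 := by
  have h1 := pvLt_pow_len (10 ^ H)
  have h2 := pvPow_len_le (10 ^ H) (Nat.one_le_pow _ _ (by omega))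
  have hlt : H < (Nat.toDigits 10 (10 ^ H)).length :=
    (Nat.pow_lt_pow_iff_right (by omega)).mp h1
  have hle : (Nat.toDigits 10 (10 ^ H)).length - 1 ≤ H :=
    (Nat.pow_le_pow_iff_right (by omega)).mp h2
  omega

lemma pvNumTwice_pow (H : Nat) : pvNumTwice ((10 : Int) ^ H) = 10 ^ (2 * H + 1) + 10 ^ H := by
  have h1 : (1 : Int) ≤ 10 ^ H := one_le_pow₀ (by norm_num)
  rw [pvNumTwice_closed _ h1]
  have ht : ((10 : Int) ^ H).toNat = 10 ^ H := by
    rw [show ((10:Int) ^ H) = ((10 ^ H : Nat) : Int) by push_cast; ring, Int.toNat_natCast]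
  rw [ht, pvLen_pow H]
  ring

lemma pvChain_stop (limit s e : Int) (h : ¬ (s < e ∧ pvNumTwice s ≤ limit)) :
    pvChain limit s e = [] := by
  rw [pvChain, dif_neg h]

lemma pvChain_step (limit s e : Int) (h : s < e ∧ pvNumTwice s ≤ limit) :
    pvChain limit s e = pvNumTwice s :: pvChain limit (s + 1) e := by
  rw [pvChain, dif_pos h]

-- A's inner loop over range(s, e) extends the accumulator by the chain from s, stopping before e
lemma pvInnerA_eq (limit : Int) : ∀ (k : Nat) (s e : Int) (acc : List Int), (e - s).toNat = k →
    pvInnerA limit (PySem.List.pyRange s e 1) acc = acc ++ pvChain limit s e := by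
  intro k
  induction k with
  | zero =>
      intro s e acc hk
      have hse : e ≤ s := by omega
      rw [PySem.List.pyRange_one_eq_nil hse, pvChain_stop limit s e (by omega)]
      simp [pvInnerA]
  | succ k ih =>
      intro s e acc hk
      have hse : s < e := by omega
      rw [PySem.List.pyRange_one_cons hse]
      simp only [pvInnerA]
      by_cases hnum : pvNumTwice s > limit
      · rw [if_pos hnum, pvChain_stop limit s e (by omega)]
        simp
      · rw [if_neg hnum, ih (s + 1) e _ (by omega),
            pvChain_step limit s e ⟨hse, by omega⟩]
        simp

-- chains concatenate at any cut point (uses monotonicity)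
lemma pvChain_append (limit : Int) : ∀ (k : Nat) (s m e : Int), 1 ≤ s → s ≤ m → m ≤ e →
    (m - s).toNat = k →
    pvChain limit s e = pvChain limit s m ++ pvChain limit m e := by
  intro k
  induction k with
  | zero =>
      intro s m e h1 hsm hme hk
      have : s = m := by omega
      subst this
      rw [pvChain_stop limit s s (by omega)]
      simp
  | succ k ih =>
      intro s m e h1 hsm hme hk
      have hsm' : s < m := by omega
      by_cases hnum : pvNumTwice s ≤ limit
      · rw [pvChain_step limit s e ⟨by omega, hnum⟩, pvChain_step limit s m ⟨hsm', hnum⟩,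
            ih (s + 1) m e (by omega) (by omega) hme (by omega)]
        simp
      · rw [pvChain_stop limit s e (by omega), pvChain_stop limit s m (by omega),
            pvChain_stop limit m e (by
              intro hc
              exact hnum (le_trans (pvNumTwice_mono s m h1 hsm) hc.2))]
        simp

-- B's loop equals the chain truncated at any e whose num already exceeds the limit
lemma pvLoopB_eq (limit : Int) : ∀ (k : Nat) (s e : Int) (acc : List Int), s ≤ e →
    limit < pvNumTwice e → (e - s).toNat = k →
    pvLoopB limit s acc = acc ++ pvChain limit s e := by
  intro k
  induction k with
  | zero =>
      intro s e acc hse he hk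
      have : s = e := by omega
      subst this
      rw [pvLoopB, pvChain_stop limit s s (by omega)]
      split
      · simp
      · omega
  | succ k ih =>
      intro s e acc hse he hk
      have hse' : s < e := by omega
      rw [pvLoopB]
      split
      case isTrue hnum =>
        rw [pvChain_stop limit s e (by omega)]
        simp
      case isFalse hnum =>
        rw [ih (s + 1) e _ (by omega) he (by omega),
            pvChain_step limit s e ⟨hse', by omega⟩]
        simp

lemma pvOuterRange (L : Nat) :
    PySem.List.pyRange 2 ((L : Int) + 1) 2 =
      (List.range (L / 2)).map (fun (k : Nat) => 2 + 2 * (k : Int)) := by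
  rw [PySem.List.pyRange_of_pos _ _ (by norm_num)]
  have hN : (if (2 : Int) < (L : Int) + 1 then (((L : Int) + 1 - 2 + 2 - 1) / 2).toNat else 0)
      = L / 2 := by
    by_cases h : (2 : Int) < (L : Int) + 1
    · rw [if_pos h]
      have h1 : ((L : Int) + 1 - 2 + 2 - 1) = (L : Int) := by ring
      rw [h1, show ((L : Int)) / 2 = ((L / 2 : Nat) : Int) from (Int.natCast_div L 2).symm,
          Int.toNat_natCast]
    · rw [if_neg h]
      omega
  rw [hN]

lemma pvBlock_body (limit : Int) (invalid : List Int) (k : Nat) :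
    (let half := PySem.Int.floordiv (2 + 2 * (k : Int)) 2
     let start : Int := 10 ^ (half - 1).toNat
     let stop : Int := 10 ^ half.toNat
     pvInnerA limit (PySem.List.pyRange start stop 1) invalid) =
    pvInnerA limit (PySem.List.pyRange ((10 : Int) ^ k) ((10 : Int) ^ (k + 1)) 1) invalid := by
  have hcast : (2 + 2 * (k : Int)) = ((2 + 2 * k : Nat) : Int) := by push_cast; ring
  have hfd : PySem.Int.floordiv (2 + 2 * (k : Int)) 2 = ((k + 1 : Nat) : Int) := by
    rw [hcast, show (2 : Int) = ((2 : Nat) : Int) from rfl, PySem.Int.floordiv_natCast]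
    congr 1
    omega
  simp only [hfd]
  have h1 : (((k + 1 : Nat) : Int) - 1).toNat = k := by omega
  have h2 : ((k + 1 : Nat) : Int).toNat = k + 1 := by omega
  rw [h1, h2]

lemma pvFoldBlocks (limit : Int) : ∀ H : Nat,
    (List.range H).foldl
      (fun invalid k =>
        pvInnerA limit (PySem.List.pyRange ((10 : Int) ^ k) ((10 : Int) ^ (k + 1)) 1) invalid)
      [] = pvChain limit 1 ((10 : Int) ^ H) := by
  intro H
  induction H with
  | zero =>
      simp [pvChain_stop limit 1 1 (by omega)]
  | succ H ih =>
      rw [List.range_succ, List.foldl_append, ih]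
      simp only [List.foldl_cons, List.foldl_nil]
      rw [pvInnerA_eq limit (((10 : Int) ^ (H + 1) - (10 : Int) ^ H).toNat) _ _ _ rfl]
      have h1 : (1 : Int) ≤ 10 ^ H := one_le_pow₀ (by norm_num)
      have h2 : (10 : Int) ^ H ≤ 10 ^ (H + 1) := pow_le_pow_right₀ (by norm_num) (by omega)
      rw [← pvChain_append limit (((10 : Int) ^ H - 1).toNat) 1 ((10 : Int) ^ H)
            ((10 : Int) ^ (H + 1)) le_rfl h1 h2 rfl]

lemma pvNumTwice_nonneg (r : Int) : 0 ≤ pvNumTwice r :=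
  pvStrToIntAux_nonneg _ 0 le_rfl

lemma pvStop (limit : Int) :
    limit < pvNumTwice ((10 : Int) ^ ((PySem.Int.toChars limit).length / 2)) := by
  by_cases hlim : limit < 0
  · exact lt_of_lt_of_le hlim (le_trans (by omega) (pvNumTwice_nonneg _))
  · have hchars : PySem.Int.toChars limit = Nat.toDigits 10 limit.toNat := by
      simp [PySem.Int.toChars, hlim]
    set L := (PySem.Int.toChars limit).length with hLdef
    have hL : L = (Nat.toDigits 10 limit.toNat).length := by rw [hLdef, hchars]
    have hb := pvLt_pow_len limit.toNat
    have hbi : limit < (10 : Int) ^ L := by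
      have : ((limit.toNat : Int)) = limit := Int.toNat_of_nonneg (by omega)
      calc limit = ((limit.toNat : Int)) := this.symm
        _ < ((10 ^ (Nat.toDigits 10 limit.toNat).length : Nat) : Int) := by exact_mod_cast hb
        _ = (10 : Int) ^ L := by rw [hL]; push_cast; ring
    rw [pvNumTwice_pow (L / 2)]
    have hLe : L ≤ 2 * (L / 2) + 1 := by omega
    have : (10 : Int) ^ L ≤ 10 ^ (2 * (L / 2) + 1) := pow_le_pow_right₀ (by norm_num) hLe
    have hp : (0 : Int) < 10 ^ (L / 2) := by positivity
    omega

theorem generate_invalid_ids_spec : Claim_equal_generate_invalid_ids := by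
  intro limit _
  show generate_invalid_ids limit = generate_invalid_ids_alt limit
  have hL : PySem.Str.len (PySem.Int.toStr limit) = ((PySem.Int.toChars limit).length : Int) := by
    simp [PySem.Str.len, PySem.Int.toList_toStr]
  set L := (PySem.Int.toChars limit).length with hLdef
  have hA : generate_invalid_ids limit = pvChain limit 1 ((10 : Int) ^ (L / 2)) := by
    unfold generate_invalid_ids
    rw [hL, pvOuterRange L, List.foldl_map]
    refine Eq.trans (List.foldl_ext _ _ [] ?_) (pvFoldBlocks limit (L / 2))
    intro acc k _
    exact pvBlock_body limit acc k
  have hB : generate_invalid_ids_alt limit = pvChain limit 1 ((10 : Int) ^ (L / 2)) := by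
    unfold generate_invalid_ids_alt
    rw [pvLoopB_eq limit (((10 : Int) ^ (L / 2) - 1).toNat) 1 ((10 : Int) ^ (L / 2)) []
          (one_le_pow₀ (by norm_num)) (pvStop limit) rfl]
    simp
  rw [hA, hB]
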